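-- pv_equiv track=rewrite | github.com/Liza23/cmu-10799-diffusion-and-flow-matching | scripts/eval_attr_confusion.py | resolve_attr_index
-- ===== SOURCE A (Python) =====
-- from typing import List, Tuple
--
-- def resolve_attr_index(name_or_index: str, attr_names: List[str]) -> int:
--     if name_or_index.isdigit():
--         idx = int(name_or_index)
--         if 0 <= idx < len(attr_names):
--             return idx
--         raise ValueError(f"Attribute index out of range: {idx}")
--
--     if name_or_index in attr_names:
--         return attr_names.index(name_or_index)
--
--     lower_map = {n.lower(): i for i, n in enumerate(attr_names)}
--     k = name_or_index.lower()
--     if k in lower_map: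
--         return lower_map[k]
--
--     raise ValueError(
--         f"Unknown attribute '{name_or_index}'. "
--         f"Expected one of: {', '.join(attr_names)}"
--     )
-- ===== SOURCE B (Python) =====
-- def resolve_attr_index(name_or_index, attr_names):
--     if name_or_index.isdigit():
--         idx = int(name_or_index)
--         if 0 <= idx < len(attr_names):
--             return idx
--         raise ValueError(f"Attribute index out of range: {idx}")
--     k = name_or_index.lower()
--     low = None
--     for i, n in enumerate(attr_names):
--         if n == name_or_index:
--             return i
--         if n.lower() == k:
--             low = i
--     if low is not None:
--         return low
--     raise ValueError(
--         f"Unknown attribute '{name_or_index}'. "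
--         f"Expected one of: {', '.join(attr_names)}"
--     )
-- ===== Notes on version B (the rewrite author's own statement) =====
-- stated objective: simpler
-- what changed: Replaces A's three separate passes (membership test + list.index, then a full lowercase dict comprehension + lookup) with one enumerate loop that returns the first exact match immediately and records the last lowercase match in a variable.
import Mathlib
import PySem

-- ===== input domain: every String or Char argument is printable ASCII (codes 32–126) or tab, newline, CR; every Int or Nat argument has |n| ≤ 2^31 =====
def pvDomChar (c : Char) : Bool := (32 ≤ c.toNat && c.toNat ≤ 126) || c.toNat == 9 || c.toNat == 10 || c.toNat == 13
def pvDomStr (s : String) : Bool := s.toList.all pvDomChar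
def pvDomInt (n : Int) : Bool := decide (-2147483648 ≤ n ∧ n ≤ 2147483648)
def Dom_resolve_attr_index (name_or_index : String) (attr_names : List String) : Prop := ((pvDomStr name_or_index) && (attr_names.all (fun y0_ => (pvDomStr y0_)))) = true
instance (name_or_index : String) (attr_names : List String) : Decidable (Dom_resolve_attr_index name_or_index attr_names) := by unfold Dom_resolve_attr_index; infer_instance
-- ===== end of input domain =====

-- B replaces A's three separate passes (membership + list.index, then a lowercase dict + lookup)
-- with one enumerate loop: first exact match returns at once, the last lowercase match is recorded.
-- Both raise ValueError on out-of-range digit indices and unknown names; those inputs are outside Pre_.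

-- ===== PORT A =====
def resolve_attr_index (name_or_index : String) (attr_names : List String) : Int :=
  if PySem.Str.strIsdigit name_or_index then
    let idx := (PySem.Int.ofStr? name_or_index).getD 0
    if 0 ≤ idx ∧ idx < (attr_names.length : Int) then idx
    else 0  -- raise ValueError: out of range (excluded by Pre_)
  else if name_or_index ∈ attr_names then
    ((PySem.List.index? attr_names name_or_index).getD 0 : Nat)
  else
    let lower_map : PySem.Dict String Int :=
      (PySem.List.enumerate attr_names 0).foldl
        (fun d p => d.insert (PySem.Str.lower p.2) p.1) PySem.Dict.empty
    let k := PySem.Str.lower name_or_index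
    match lower_map.get? k with
    | some i => i
    | none => 0  -- raise ValueError: unknown attribute (excluded by Pre_)

-- ===== PORT B =====
-- the single loop of Source B: return first exact match, remember the LAST lowercase match
def pvBLoop (s k : String) : List (Int × String) → Option Int → Int
  | [], low => low.getD 0  -- low = None here means raise ValueError (excluded by Pre_)
  | p :: rest, low =>
      if p.2 == s then p.1
      else pvBLoop s k rest (if PySem.Str.lower p.2 == k then some p.1 else low)

def resolve_attr_index_alt (name_or_index : String) (attr_names : List String) : Int :=
  if PySem.Str.strIsdigit name_or_index then
    let idx := (PySem.Int.ofStr? name_or_index).getD 0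
    if 0 ≤ idx ∧ idx < (attr_names.length : Int) then idx
    else 0  -- raise ValueError: out of range (excluded by Pre_)
  else
    pvBLoop name_or_index (PySem.Str.lower name_or_index)
      (PySem.List.enumerate attr_names 0) none

-- ===== PRECONDITION & SPEC =====
-- Pre_ excludes exactly the inputs where A (and B) raise ValueError: a digit string whose
-- value is out of range, and a non-digit name with neither an exact nor a case-insensitive match.
def Pre_resolve_attr_index (name_or_index : String) (attr_names : List String) : Prop :=
  if PySem.Str.strIsdigit name_or_index then
    (PySem.Int.ofStr? name_or_index).getD 0 < (attr_names.length : Int)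
  else
    name_or_index ∈ attr_names ∨
      PySem.Str.lower name_or_index ∈ attr_names.map PySem.Str.lower
instance (name_or_index : String) (attr_names : List String) : Decidable (Pre_resolve_attr_index name_or_index attr_names) := by unfold Pre_resolve_attr_index; infer_instance

def pvWitness_resolve_attr_index : String × List String := ("color", ["Color", "shape"])

def Spec_resolve_attr_index (name_or_index : String) (attr_names : List String) (out : Int) : Prop := out = resolve_attr_index_alt name_or_index attr_names
instance (name_or_index : String) (attr_names : List String) (out : Int) : Decidable (Spec_resolve_attr_index name_or_index attr_names out) := by unfold Spec_resolve_attr_index; infer_instance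

-- ===== CLAIM (what is proved, stated in full; the proofs are below) =====
def Claim_equal_resolve_attr_index : Prop := ∀ (name_or_index : String) (attr_names : List String), Dom_resolve_attr_index name_or_index attr_names → Pre_resolve_attr_index name_or_index attr_names → Spec_resolve_attr_index name_or_index attr_names (resolve_attr_index name_or_index attr_names)

-- ===== LEMMAS AND PROOFS =====

-- B's loop on a list containing an exact match returns (offset + first index of the match),
-- regardless of the recorded lowercase state.
theorem pvBLoop_of_mem (s k : String) (l : List String) (i0 : Int) (low : Option Int)
    (h : s ∈ l) :
    pvBLoop s k (PySem.List.enumerate l i0) low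
      = i0 + ((PySem.List.index? l s).getD 0 : Nat) := by
  induction l generalizing i0 low with
  | nil => cases h
  | cons a l ih =>
    rw [PySem.List.enumerate_cons]
    by_cases ha : a = s
    · subst ha
      rw [PySem.List.index?_cons_self]
      simp [pvBLoop]
    · have hs : s ∈ l := by
        rcases List.mem_cons.mp h with h' | h'
        · exact absurd h'.symm ha
        · exact h'
      rw [PySem.List.index?_cons_of_ne l ha]
      obtain ⟨m, hm⟩ := Option.isSome_iff_exists.mp
        ((PySem.List.index?_isSome_iff l s).mpr hs)
      simp only [pvBLoop, beq_iff_eq, ha, if_false]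
      rw [ih _ _ hs, hm]
      simp only [Option.map_some, Option.getD_some]
      push_cast
      ring

-- last-lowercase-match of an enumerated list, as a find? over the reverse
def pvLast (k : String) (L : List (Int × String)) : Option Int :=
  (L.reverse.find? (fun p => PySem.Str.lower p.2 == k)).map (·.1)

theorem pvLast_append (k : String) (L M : List (Int × String)) :
    pvLast k (L ++ M) = (pvLast k M).or (pvLast k L) := by
  simp [pvLast, List.find?_append]
  cases M.reverse.find? (fun p => PySem.Str.lower p.2 == k) <;> simp [Option.or]

-- B's loop when there is no exact match: the last recorded lowercase index (or the incoming state)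
theorem pvBLoop_of_not_mem (s k : String) (L : List (Int × String)) (low : Option Int)
    (h : ∀ p ∈ L, p.2 ≠ s) :
    pvBLoop s k L low = ((pvLast k L).or low).getD 0 := by
  induction L generalizing low with
  | nil => simp [pvBLoop, pvLast]
  | cons p L ih =>
    have hp : p.2 ≠ s := h p (List.mem_cons_self)
    have hL : ∀ q ∈ L, q.2 ≠ s := fun q hq => h q (List.mem_cons_of_mem _ hq)
    simp only [pvBLoop, beq_iff_eq, hp, if_false]
    rw [ih _ hL]
    have : pvLast k (p :: L) = (pvLast k L).or (pvLast k [p]) := by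
      have := pvLast_append k [p] L
      simpa using this
    rw [this]
    by_cases hk : PySem.Str.lower p.2 = k
    · cases pvLast k L <;> simp [pvLast, hk, Option.or]
    · cases pvLast k L <;> simp [pvLast, hk, Option.or]

-- A's dict-comprehension lookup equals the last lowercase match
theorem pvDict_get (k : String) (L : List (Int × String)) (d : PySem.Dict String Int) :
    (L.foldl (fun d p => d.insert (PySem.Str.lower p.2) p.1) d).get? k
      = (pvLast k L).or (d.get? k) := by
  induction L generalizing d with
  | nil => simp [pvLast, Option.or]
  | cons p L ih =>
    simp only [List.foldl_cons]
    rw [ih]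
    have : pvLast k (p :: L) = (pvLast k L).or (pvLast k [p]) := by
      have := pvLast_append k [p] L
      simpa using this
    rw [this]
    by_cases hk : PySem.Str.lower p.2 = k
    · cases hfind : pvLast k L <;>
        simp [pvLast, hk, Option.or, PySem.Dict.get?_insert_self]
    · cases hfind : pvLast k L <;>
        simp [pvLast, hk, Option.or,
          PySem.Dict.get?_insert_of_ne d p.1 (fun h => hk h.symm)]

-- the lowercase-membership hypothesis makes pvLast a some
theorem pvLast_isSome (k : String) (l : List String)
    (h : k ∈ l.map PySem.Str.lower) :
    (pvLast k (PySem.List.enumerate l 0)).isSome := by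
  simp only [pvLast, Option.isSome_map]
  rw [List.find?_isSome]
  simp only [List.mem_map] at h
  obtain ⟨a, ha, hk⟩ := h
  have : a ∈ (PySem.List.enumerate l 0).map (·.2) := by
    rw [PySem.List.map_snd_enumerate]; exact ha
  obtain ⟨p, hp, hpa⟩ := List.mem_map.mp this
  exact ⟨p, by simpa using hp, by simp [hpa, hk]⟩

-- ===== VERDICT (by name: the statement is the Claim_ definition above) =====
theorem resolve_attr_index_spec : Claim_equal_resolve_attr_index := by
  intro s attr _hDom hPre
  unfold Spec_resolve_attr_index resolve_attr_index resolve_attr_index_alt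
  by_cases hd : PySem.Str.strIsdigit s
  · rw [PySem.Str.strIsdigit_eq] at hd
    simp [hd]
  · unfold Pre_resolve_attr_index at hPre
    rw [if_neg hd] at hPre
    rw [if_neg hd, if_neg hd]
    by_cases hmem : s ∈ attr
    · rw [if_pos hmem, pvBLoop_of_mem s _ attr 0 none hmem]
      simp only [PySem.List.index?_eq_idxOf?]
      omega
    · rw [if_neg hmem]
      have hlow : PySem.Str.lower s ∈ attr.map PySem.Str.lower := by
        rcases hPre with h | h
        · exact absurd h hmem
        · exact h
      have hne : ∀ p ∈ PySem.List.enumerate attr 0, p.2 ≠ s := by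
        intro p hp hps
        exact hmem (by
          have : p.2 ∈ (PySem.List.enumerate attr 0).map (·.2) :=
            List.mem_map_of_mem hp
          rw [PySem.List.map_snd_enumerate] at this
          rwa [hps] at this)
      rw [pvBLoop_of_not_mem _ _ _ _ hne]
      obtain ⟨i, hi⟩ := Option.isSome_iff_exists.mp (pvLast_isSome _ attr hlow)
      simp only [pvDict_get, PySem.Dict.get?_empty, hi, Option.or, Option.getD_some]
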